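-- pv_equiv track=rewrite | github.com/Challenge-Next-Level/Floyd-Warshall | LeeYooseok/Toss 2022 NEXT/1.py | solution_new
-- ===== SOURCE A (Python) =====
-- def solution_new(s):
--     answer = -1
--     idx = 0
--     while idx < len(s) - 2:
--         if s[idx] == s[idx + 1] and s[idx] == s[idx+2]:
--             answer = max(int(s[idx]), answer)
--             idx += 2
--         else:
--             idx += 1
--     if answer == 0:
--         return answer
--     elif answer == -1:
--         return answer
--     else:
--         return int(str(answer) * 3)
-- ===== SOURCE B (Python) =====
-- def solution_new(s):
--     # Run-length scan: find maximal runs of identical characters; any run of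
--     # length >= 3 contributes its digit. Same 0/-1/repeat-the-digit tail as A.
--     answer = -1
--     n = len(s)
--     i = 0
--     while i < n:
--         j = i + 1
--         while j < n and s[j] == s[i]:
--             j += 1
--         if j - i >= 3:
--             answer = max(int(s[i]), answer)
--         i = j
--     if answer == 0 or answer == -1:
--         return answer
--     return int(str(answer) * 3)
-- ===== Notes on version B (the rewrite author's own statement) =====
-- stated objective: alternative
-- what changed: Replaces A's overlapping triple sliding window (with its idx+=2 skip after a hit) by a run-length scan over maximal runs of identical characters, recording each run of length >= 3 once.
import Mathlib
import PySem

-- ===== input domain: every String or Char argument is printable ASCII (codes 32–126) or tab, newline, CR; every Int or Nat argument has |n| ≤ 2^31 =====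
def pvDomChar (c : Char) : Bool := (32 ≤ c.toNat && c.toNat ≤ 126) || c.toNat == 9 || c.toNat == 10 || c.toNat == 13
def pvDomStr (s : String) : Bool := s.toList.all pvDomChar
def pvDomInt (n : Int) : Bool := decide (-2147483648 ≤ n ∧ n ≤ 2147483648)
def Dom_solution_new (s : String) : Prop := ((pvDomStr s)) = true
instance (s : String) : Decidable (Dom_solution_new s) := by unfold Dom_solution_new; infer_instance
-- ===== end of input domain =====

-- B replaces A's overlapping-triple sliding window by a run-length scan over
-- maximal runs of identical characters (objective: alternative, same cost).

-- int(c) for a single character c; Pre_ guarantees c is a digit wherever a port calls this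
def pvDigitVal (c : Char) : Int := (PySem.Int.ofStr? (String.ofList [c])).getD 0

-- int(str(answer) * 3) — shared final conversion text of both Pythons
def pvTriple (ans : Int) : Int :=
  (PySem.Int.ofStr? (PySem.Int.toStr ans ++ PySem.Int.toStr ans ++ PySem.Int.toStr ans)).getD 0

-- ===== PORT A =====
-- A's while loop over idx, as structural recursion on the remaining suffix s[idx:]
-- (the loop condition idx < len(s)-2 ⟺ the suffix has ≥ 3 characters; idx += 2 drops two)
def pvLoopA : List Char → Int → Int
  | a :: b :: c :: t, ans =>
      if a = b ∧ a = c then pvLoopA (c :: t) (max (pvDigitVal a) ans)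
      else pvLoopA (b :: c :: t) ans
  | _, ans => ans

def solution_new (s : String) : Int :=
  let answer := pvLoopA s.toList (-1)
  if answer = 0 then answer
  else if answer = -1 then answer
  else pvTriple answer

-- ===== PORT B =====
-- inner while loop: length of the run of c at the head of the list, and the rest
def pvRunLen (c : Char) : List Char → Nat × List Char
  | [] => (0, [])
  | x :: t => if x = c then let p := pvRunLen c t; (p.1 + 1, p.2) else (0, x :: t)

theorem pvRunLen_len_le (c : Char) (t : List Char) : (pvRunLen c t).2.length ≤ t.length := by
  induction t with
  | nil => simp [pvRunLen]
  | cons x t ih =>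
      simp only [pvRunLen]
      split
      · simpa using Nat.le_succ_of_le ih
      · simp

def pvLoopB : List Char → Int → Int
  | [], ans => ans
  | x :: t, ans =>
      let p := pvRunLen x t
      pvLoopB p.2 (if 3 ≤ p.1 + 1 then max (pvDigitVal x) ans else ans)
termination_by l => l.length
decreasing_by
  simpa using Nat.lt_succ_of_le (pvRunLen_len_le x t)

def solution_new_alt (s : String) : Int :=
  let answer := pvLoopB s.toList (-1)
  if answer = 0 ∨ answer = -1 then answer
  else pvTriple answer

-- ===== PRECONDITION & SPEC =====
-- Pre_ excludes exactly the inputs on which the Python A raises ValueError: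
-- strings containing three consecutive equal NON-digit characters (B raises there too).
-- The Lean ports are total (int() ported as (ofStr? ...).getD 0) and agree even outside
-- Pre_, so the proof below does not need the hypothesis; Pre_ marks where Python raises.
def Pre_solution_new (s : String) : Prop :=
  ∀ p ∈ s.toList.zip ((s.toList.drop 1).zip (s.toList.drop 2)),
    p.1 = p.2.1 → p.1 = p.2.2 → p.1.isDigit
instance (s : String) : Decidable (Pre_solution_new s) := by unfold Pre_solution_new; infer_instance

def pvWitness_solution_new : String := "ab111c99"

def Spec_solution_new (s : String) (out : Int) : Prop := out = solution_new_alt s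
instance (s : String) (out : Int) : Decidable (Spec_solution_new s out) := by unfold Spec_solution_new; infer_instance

-- ===== CLAIM (what is proved, stated in full; the proofs are below) =====
def Claim_equal_solution_new : Prop := ∀ (s : String), Dom_solution_new s → Pre_solution_new s → Spec_solution_new s (solution_new s)

-- ===== LEMMAS AND PROOFS =====

-- pvRunLen decomposes the list into the maximal head run and a rest not starting with c
theorem pvRunLen_spec (c : Char) (t : List Char) :
    t = List.replicate (pvRunLen c t).1 c ++ (pvRunLen c t).2 ∧
    ∀ y ∈ (pvRunLen c t).2.head?, y ≠ c := by
  induction t with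
  | nil => simp [pvRunLen]
  | cons x t ih =>
      by_cases h : x = c
      · subst h
        simp only [pvRunLen, if_pos]
        refine ⟨?_, ih.2⟩
        conv_lhs => rw [ih.1]
        simp [List.replicate_succ]
      · simp [pvRunLen, h]

-- A's loop across one maximal run: a run of length m (rest not starting with x)
-- contributes max(val x, ans) iff m ≥ 3, then the loop continues on the rest.
theorem pvLoopA_run (x : Char) (rest : List Char)
    (hx : ∀ y ∈ rest.head?, y ≠ x) :
    ∀ m, 1 ≤ m → ∀ ans,
      pvLoopA (List.replicate m x ++ rest) ans
        = pvLoopA rest (if 3 ≤ m then max (pvDigitVal x) ans else ans) := by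
  intro m
  induction m using Nat.strong_induction_on with
  | _ m ih =>
    intro hm ans
    match m, hm with
    | 1, _ =>
        match rest, hx with
        | [], _ => simp [pvLoopA]
        | [r], _ => simp [pvLoopA]
        | r0 :: r1 :: rr, hx =>
            have h0 : ¬(x = r0) := fun h => hx r0 (by simp) h.symm
            simp [pvLoopA, h0]
    | 2, _ =>
        match rest, hx with
        | [], _ => simp [pvLoopA]
        | [r], hx =>
            have h0 : ¬(x = r) := fun h => hx r (by simp) h.symm
            simp [pvLoopA, List.replicate, h0]
        | r0 :: r1 :: rr, hx =>
            have h0 : ¬(x = r0) := fun h => hx r0 (by simp) h.symm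
            simp [pvLoopA, List.replicate, h0]
    | (k+3), _ =>
        have hrepl : List.replicate (k+3) x ++ rest
            = x :: x :: x :: (List.replicate k x ++ rest) := by
          simp [List.replicate_succ]
        rw [hrepl]
        have step : pvLoopA (x :: x :: x :: (List.replicate k x ++ rest)) ans
            = pvLoopA (x :: (List.replicate k x ++ rest)) (max (pvDigitVal x) ans) := by
          simp [pvLoopA]
        rw [step]
        have hx1 : x :: (List.replicate k x ++ rest) = List.replicate (k+1) x ++ rest := by
          simp [List.replicate_succ]
        rw [hx1, ih (k+1) (by omega) (by omega) (max (pvDigitVal x) ans)]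
        have hmax : max (pvDigitVal x) (max (pvDigitVal x) ans) = max (pvDigitVal x) ans := by
          rw [← max_assoc, max_self]
        by_cases h3 : 3 ≤ k + 1
        · rw [hmax]; simp [h3, show 3 ≤ k + 3 by omega]
        · simp [h3, show 3 ≤ k + 3 by omega]

-- the two loops agree on every list and accumulator
theorem pvLoop_eq : ∀ (n : Nat) (l : List Char), l.length ≤ n →
    ∀ ans, pvLoopA l ans = pvLoopB l ans := by
  intro n
  induction n with
  | zero =>
      intro l hl ans
      match l, hl with
      | [], _ => simp [pvLoopA, pvLoopB]
  | succ n ih =>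
      intro l hl ans
      match l with
      | [] => simp [pvLoopA, pvLoopB]
      | x :: t =>
          have hspec := pvRunLen_spec x t
          have hlen := pvRunLen_len_le x t
          have hdecomp : x :: t = List.replicate ((pvRunLen x t).1 + 1) x ++ (pvRunLen x t).2 := by
            conv_lhs => rw [hspec.1]
            simp [List.replicate_succ]
          have hB : pvLoopB (x :: t) ans
              = pvLoopB (pvRunLen x t).2
                  (if 3 ≤ (pvRunLen x t).1 + 1 then max (pvDigitVal x) ans else ans) := by
            rw [pvLoopB.eq_def]
          rw [hB, hdecomp, pvLoopA_run x (pvRunLen x t).2 hspec.2 _ (by omega)]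
          exact ih (pvRunLen x t).2 (by simp at hl; omega) _

-- ===== VERDICT (by name: the statement is the Claim_ definition above) =====
theorem solution_new_spec : Claim_equal_solution_new := by
  intro s _ _
  unfold Spec_solution_new solution_new solution_new_alt
  rw [pvLoop_eq s.toList.length s.toList le_rfl]
  set a := pvLoopB s.toList (-1) with ha
  by_cases h0 : a = 0
  · simp [h0]
  · by_cases h1 : a = -1
    · simp [h1]
    · simp [h0, h1]
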